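-- pv_equiv track=rewrite | github.com/emord/project-euler | python/prob51-60/prob54.py | isXOfAKind
-- ===== SOURCE A (Python) =====
-- def isXOfAKind(cards, x):
--     y = dict()
--     for card in cards:
--         if card[0] not in y.keys(): y[card[0]] = 1
--         else: y[card[0]] += 1
--
--     for value in y.keys():
--         if y[value] == x: return (True, value)
--
--     return (False, '0')
-- ===== SOURCE B (Python) =====
-- def isXOfAKind(cards, x):
--     ranks = [c[0] for c in cards]
--     while ranks:
--         r = ranks[0]
--         if len([t for t in ranks if t == r]) == x:
--             return (True, r)
--         ranks = [t for t in ranks if t != r]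
--     return (False, '0')
-- ===== Notes on version B (the rewrite author's own statement) =====
-- stated objective: alternative
-- what changed: Replaced the frequency dict with a partition-and-discard loop: take the first remaining rank, count it by partitioning the current list, answer if the count is x, otherwise discard all its occurrences and continue; each distinct rank is handled once on an ever-shrinking list.
import Mathlib
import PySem

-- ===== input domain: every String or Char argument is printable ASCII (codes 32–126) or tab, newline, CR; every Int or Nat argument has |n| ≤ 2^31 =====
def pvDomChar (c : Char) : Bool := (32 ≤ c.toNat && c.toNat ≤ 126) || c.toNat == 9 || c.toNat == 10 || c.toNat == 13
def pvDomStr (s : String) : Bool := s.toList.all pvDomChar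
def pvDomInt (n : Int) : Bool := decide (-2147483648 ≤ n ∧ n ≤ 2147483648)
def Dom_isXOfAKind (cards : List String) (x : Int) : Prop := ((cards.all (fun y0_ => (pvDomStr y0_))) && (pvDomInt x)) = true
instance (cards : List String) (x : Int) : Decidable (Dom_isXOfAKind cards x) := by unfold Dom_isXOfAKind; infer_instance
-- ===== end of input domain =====

-- B replaces the frequency dict with a partition-and-discard loop over distinct ranks
-- (alternative decomposition; equal because each discarded rank can no longer be the answer).


-- ===== PORT A =====
-- card[0] (a one-character string); Pre_ guarantees the card is nonempty, so the none branch is unreachable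
def rank0 (card : String) : String :=
  match PySem.Str.pyGet? card 0 with
  | some c => String.singleton c
  | none => ""

-- second loop of A: 'for value in y.keys(): if y[value] == x: return (True, value)'
def findKeyA (y : PySem.Dict String Int) (x : Int) : List String → Bool × String
  | [] => (false, "0")
  | k :: ks => if y.getD k 0 == x then (true, k) else findKeyA y x ks

def isXOfAKind (cards : List String) (x : Int) : Bool × String :=
  let y : PySem.Dict String Int :=
    cards.foldl (fun y card =>
      if y.contains (rank0 card) then y.insert (rank0 card) (y.getD (rank0 card) 0 + 1)
      else y.insert (rank0 card) 1) PySem.Dict.empty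
  findKeyA y x y.keys

-- ===== PORT B =====
-- the while loop: r = ranks[0]; count r by partitioning; answer or discard all r's and repeat
def scanB (x : Int) : List String → Bool × String
  | [] => (false, "0")
  | r :: rest =>
    if ((((r :: rest).filter (fun t => t == r)).length : Int) == x) then (true, r)
    else scanB x ((r :: rest).filter (fun t => !(t == r)))
  termination_by l => l.length
  decreasing_by
    have := List.length_filter_le (fun t => !(t == r)) rest
    simp
    omega

def isXOfAKind_alt (cards : List String) (x : Int) : Bool × String :=
  scanB x (cards.map rank0)

-- ===== PRECONDITION & SPEC =====
-- Pre_ excludes lists containing an empty string: there both Pythons raise IndexError on card[0].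
def Pre_isXOfAKind (cards : List String) (x : Int) : Prop := ∀ c ∈ cards, c ≠ ""
instance (cards : List String) (x : Int) : Decidable (Pre_isXOfAKind cards x) := by
  unfold Pre_isXOfAKind; infer_instance

def pvWitness_isXOfAKind : List String × Int := (["2H", "2D", "KS"], 2)

def Spec_isXOfAKind (cards : List String) (x : Int) (out : Bool × String) : Prop := out = isXOfAKind_alt cards x
instance (cards : List String) (x : Int) (out : Bool × String) : Decidable (Spec_isXOfAKind cards x out) := by unfold Spec_isXOfAKind; infer_instance

-- ===== CLAIM (what is proved, stated in full; the proofs are below) =====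
def Claim_equal_isXOfAKind : Prop := ∀ (cards : List String) (x : Int), Dom_isXOfAKind cards x → Pre_isXOfAKind cards x → Spec_isXOfAKind cards x (isXOfAKind cards x)

-- ===== LEMMAS AND PROOFS =====

-- the common normal form: first rank whose total count is x, scanning in list order
def findFirst (ranks : List String) (x : Int) : Bool × String :=
  (ranks.find? (fun r => ((ranks.count r : Int) == x))).elim (false, "0") (fun r => (true, r))

-- A's counting branch is exactly the Counter step.
theorem step_eq_modify (y : PySem.Dict String Int) (k : String) :
    (if y.contains k then y.insert k (y.getD k 0 + 1) else y.insert k 1)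
      = y.modify k 0 (· + 1) := by
  by_cases h : y.contains k = true
  · simp [h, PySem.Dict.modify]
  · have hg : y.getD k 0 = 0 := by
      simp [PySem.Dict.getD, (PySem.Dict.get?_eq_none_iff_contains y k).2 (by simpa using h)]
    simp [h, PySem.Dict.modify, hg]

theorem fold_eq_counter (cards : List String) :
    (cards.foldl (fun y card =>
      if y.contains (rank0 card) then y.insert (rank0 card) (y.getD (rank0 card) 0 + 1)
      else y.insert (rank0 card) 1) PySem.Dict.empty)
      = PySem.Dict.counter (cards.map rank0) := by
  rw [PySem.Dict.counter_eq_foldl, List.foldl_map]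
  exact PySem.List.foldl_congr_mem _ _ _ _ (fun y c _ => step_eq_modify y (rank0 c))

-- the A-side key scan over the counter is a find? with the count predicate
theorem findKeyA_eq_find? (ranks : List String) (x : Int) (ks : List String) :
    findKeyA (PySem.Dict.counter ranks) x ks
      = (ks.find? (fun k => ((ranks.count k : Int) == x))).elim (false, "0") (fun k => (true, k)) := by
  induction ks with
  | nil => rfl
  | cons k rest ih =>
      by_cases h : ((ranks.count k : Int) == x) = true <;>
        simp [findKeyA, List.find?, PySem.Dict.getD_counter, h, ih]

-- find? over the dedup (set-of-list) order equals find? over the original list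
theorem find?_foldl_add {α : Type} [BEq α] [LawfulBEq α] (p : α → Bool) (xs : List α) :
    ∀ s : PySem.Set α, (xs.foldl PySem.Set.add s).find? p = (s.find? p).or (xs.find? p) := by
  induction xs with
  | nil => intro s; simp
  | cons a xs ih =>
      intro s
      rw [List.foldl_cons, ih (PySem.Set.add s a)]
      by_cases h : PySem.Set.contains s a = true
      · have : PySem.Set.add s a = s := by simp only [PySem.Set.add, if_pos h]
        rw [this]
        cases hs : s.find? p with
        | some v => simp
        | none =>
            have hpa : p a = false := by
              by_contra hpa
              have : a ∈ s := by
                simpa [PySem.Set.contains, List.contains_iff_mem] using h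
              rcases List.find?_isSome.2 ⟨a, this, by simpa using hpa⟩ with hsome
              rw [hs] at hsome; simp at hsome
            simp [List.find?, hpa]
      · have : PySem.Set.add s a = s ++ [a] := by
          simp only [PySem.Set.add, if_neg h]
        rw [this, List.find?_append]
        cases hs : s.find? p with
        | some v => simp
        | none =>
            by_cases hpa : p a = true <;> simp [List.find?, hpa]

theorem find?_ofList {α : Type} [BEq α] [LawfulBEq α] (p : α → Bool) (xs : List α) :
    (PySem.Set.ofList xs).find? p = xs.find? p := by
  rw [PySem.Set.ofList_eq_foldl, find?_foldl_add p xs ([] : PySem.Set α)]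
  simp

theorem isXOfAKind_eq_findFirst (cards : List String) (x : Int) :
    isXOfAKind cards x = findFirst (cards.map rank0) x := by
  unfold isXOfAKind findFirst
  rw [fold_eq_counter]
  show findKeyA (PySem.Dict.counter (cards.map rank0)) x
        (PySem.Dict.counter (cards.map rank0)).keys
      = _
  rw [PySem.Dict.keys_counter, findKeyA_eq_find?, find?_ofList]

-- discarding all copies of a rank that fails the predicate does not change the first hit
theorem find?_filter_ne (r : String) (q₁ q₂ : String → Bool)
    (h₁ : q₁ r = false) (h₂ : ∀ t, t ≠ r → q₁ t = q₂ t) :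
    ∀ l : List String, l.find? q₁ = (l.filter (fun t => !(t == r))).find? q₂ := by
  intro l
  induction l with
  | nil => rfl
  | cons a l ih =>
      by_cases ha : a = r
      · subst ha
        rw [List.find?_cons, h₁, List.filter_cons]
        simpa using ih
      · have hne : (!(a == r)) = true := by simp [ha]
        have hq12 := h₂ a ha
        cases hq : q₂ a <;>
          simp [hne, hq12, hq, ih]

theorem scanB_eq_findFirst (x : Int) (ranks : List String) :
    scanB x ranks = findFirst ranks x := by
  induction hn : ranks.length using Nat.strong_induction_on generalizing ranks with
  | _ n ih =>
    cases ranks with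
    | nil => simp only [scanB]; rfl
    | cons r rest =>
      rw [show scanB x (r :: rest)
            = if ((((r :: rest).filter (fun t => t == r)).length : Int) == x) then (true, r)
              else scanB x ((r :: rest).filter (fun t => !(t == r))) from by
            rw [scanB.eq_def]]
      have hc : ((r :: rest).filter (fun t => t == r)).length = (r :: rest).count r := by
        simp [List.count_eq_length_filter]
      by_cases h : ((((r :: rest).filter (fun t => t == r)).length : Int) == x) = true
      · rw [if_pos h]
        rw [hc] at h
        unfold findFirst
        rw [List.find?_cons, h]
        rfl
      · rw [if_neg h]
        have hstep : List.filter (fun t => !(t == r)) (r :: rest)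
            = rest.filter (fun t => !(t == r)) := by
          simp
        have hr : (((r :: rest).count r : Int) == x) = false := by
          rw [← hc]; simpa using h
        have hlen : (rest.filter (fun t => !(t == r))).length < n := by
          subst hn
          exact Nat.lt_succ_of_le (List.length_filter_le _ _)
        rw [hstep, ih _ hlen _ rfl]
        unfold findFirst
        rw [List.find?_cons, hr]
        show _ = (List.find? _ rest).elim _ _
        exact (congrArg (fun o => Option.elim o ((false : Bool), "0") (fun k => ((true : Bool), k)))
          (find?_filter_ne r _ _
            (by simpa [List.count_cons] using hr)
            (fun t ht => by
              have h1 : (r :: rest).count t = rest.count t := by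
                simp [Ne.symm ht]
              have h2 : (rest.filter (fun t => !(t == r))).count t = rest.count t := by
                exact List.count_filter (by simpa using ht)
              rw [h1, h2]) rest)).symm

-- ===== VERDICT (by name: the statement is the Claim_ definition above) =====
theorem isXOfAKind_spec : Claim_equal_isXOfAKind := by
  intro cards x _ _
  unfold Spec_isXOfAKind isXOfAKind_alt
  rw [isXOfAKind_eq_findFirst, scanB_eq_findFirst]
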